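-- pv_equiv track=rewrite | github.com/ispras/dedoc | dedoc/structure_extractors/line_type_classifiers/abstract_law_classifier.py | _fix_labels_with_document_model
-- ===== SOURCE A (Python) =====
-- from typing import List, Tuple, Iterator
--
-- def _fix_labels_with_document_model(labels: List[str]) -> List[str]:
--     """
--     document model for law if following:
--     1 Title (before the first structure_unit)
--     2 Body (from the first structure_unit to the cellar or application or the end of the document)
--     3 Cellar (optional) after body, before the application
--     4 Application (after cellar, can be mixed with structure_units and raw text)
--
--     footer may be found in any place in the document
--
--     :param labels: predicted labels
--     :return: labels updated according to the document model
--     """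
--     title_end = None
--     application_start = None
--     last_body_unit = None
--     for index, label in enumerate(labels):
--         if title_end is None and label in ("structure_unit", "cellar", "application"):
--             title_end = index
--         if application_start is None and label == "application":
--             application_start = index
--         if application_start is None and label == "structure_unit":
--             last_body_unit = index
--     if title_end is None:
--         title_end = len(labels)
--     if application_start is None:
--         application_start = len(labels)
--     if last_body_unit is None:
--         last_body_unit = title_end
--
--     assert title_end <= application_start, "{} <= {}".format(title_end, application_start)
--     assert title_end <= last_body_unit, "{} <= {}".format(title_end, last_body_unit)
--     assert last_body_unit <= application_start, "{} <= {}".format(last_body_unit, application_start)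
--
--     result = []
--     for index, label in enumerate(labels):
--         if label == "footer":
--             result.append(label)
--         elif index < title_end:
--             result.append("title")
--         elif title_end <= index < last_body_unit:
--             if label in ("cellar", "title"):
--                 result.append("raw_text")
--             else:
--                 result.append(label)
--         elif last_body_unit <= index < application_start:
--             if label == "title":
--                 result.append("raw_text")
--             else:
--                 result.append(label)
--         elif index >= application_start:
--             if label in ("cellar", "title"):
--                 result.append("raw_text")
--             else:
--                 result.append(label)
--         else:
--             ValueError("How i get here")
--     assert len(result) == len(labels)
--     return result
-- ===== SOURCE B (Python) =====
-- def _fix_labels_with_document_model(labels):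
--     """Two streaming state machines, no indices or slices: a backward pass records,
--     for each position, whether a structure_unit occurs later before the next
--     application; a forward pass then relabels each line from two running flags
--     (boundary seen, application seen) plus that suffix flag."""
--     su_after = []
--     seen = False
--     for lab in reversed(labels):
--         su_after.append(seen)
--         if lab == "application":
--             seen = False
--         elif lab == "structure_unit":
--             seen = True
--     su_after.reverse()
--     result = []
--     boundary_seen = False
--     app_seen = False
--     for lab, su in zip(labels, su_after):
--         boundary_seen = boundary_seen or lab in ("structure_unit", "cellar", "application")
--         app_seen = app_seen or lab == "application"
--         if lab == "footer":
--             result.append(lab)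
--         elif not boundary_seen:
--             result.append("title")
--         elif lab == "title":
--             result.append("raw_text")
--         elif lab == "cellar":
--             result.append(lab if not app_seen and not su else "raw_text")
--         else:
--             result.append(lab)
--     return result
-- ===== Notes on version B (the rewrite author's own statement) =====
-- stated objective: alternative
-- what changed: Replaces A's computation of the three boundary indices and per-index region dispatch by two index-free streaming state machines: a backward pass recording for each position whether a structure_unit occurs later before the next application, then a forward pass relabelling each line from two running booleans (boundary seen, application seen) plus that suffix flag.
import Mathlib
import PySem

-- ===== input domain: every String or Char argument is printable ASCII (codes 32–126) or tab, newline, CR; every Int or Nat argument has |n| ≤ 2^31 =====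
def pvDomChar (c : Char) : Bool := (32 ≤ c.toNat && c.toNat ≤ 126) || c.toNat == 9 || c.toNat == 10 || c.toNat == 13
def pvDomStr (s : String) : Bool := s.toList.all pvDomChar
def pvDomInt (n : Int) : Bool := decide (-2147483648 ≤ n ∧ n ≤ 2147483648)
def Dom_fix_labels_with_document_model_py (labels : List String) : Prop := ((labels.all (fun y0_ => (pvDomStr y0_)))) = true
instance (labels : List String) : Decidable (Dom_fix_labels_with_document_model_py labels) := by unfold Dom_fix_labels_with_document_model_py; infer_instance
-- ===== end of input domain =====

-- B replaces A's boundary-index computation and per-index region dispatch by two index-free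
-- streaming state machines (a backward suffix-flag pass, then a forward relabelling pass);
-- alternative decomposition, same behaviour and cost.

-- ===== PORT A =====
-- label in ("structure_unit", "cellar", "application")
def pvP (x : String) : Bool := x == "structure_unit" || x == "cellar" || x == "application"
-- label == "application"
def pvQ (x : String) : Bool := x == "application"

-- the body of A's first loop (state: title_end, application_start, last_body_unit as Options)
def pvStepA (s : Option Int × Option Int × Option Int) (p : Int × String) : Option Int × Option Int × Option Int :=
  let te := if s.1 = none ∧ pvP p.2 then some p.1 else s.1
  let ap := if s.2.1 = none ∧ pvQ p.2 then some p.1 else s.2.1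
  -- Python tests the just-updated application_start here
  let lb := if ap = none ∧ p.2 = "structure_unit" then some p.1 else s.2.2
  (te, ap, lb)

def fix_labels_with_document_model_py (labels : List String) : List String :=
  let st := (PySem.List.enumerate labels).foldl pvStepA (none, none, none)
  let titleEnd : Int := st.1.getD (labels.length : Int)
  let appStart : Int := st.2.1.getD (labels.length : Int)
  let lastBody : Int := st.2.2.getD titleEnd
  -- the asserts in A always hold (titleEnd ≤ lastBody ≤ appStart, proved below); they never raise
  (PySem.List.enumerate labels).foldl (fun r p =>
      if p.2 = "footer" then r ++ [p.2]
      else if p.1 < titleEnd then r ++ ["title"]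
      else if titleEnd ≤ p.1 ∧ p.1 < lastBody then
        (if p.2 = "cellar" ∨ p.2 = "title" then r ++ ["raw_text"] else r ++ [p.2])
      else if lastBody ≤ p.1 ∧ p.1 < appStart then
        (if p.2 = "title" then r ++ ["raw_text"] else r ++ [p.2])
      else if p.1 ≥ appStart then
        (if p.2 = "cellar" ∨ p.2 = "title" then r ++ ["raw_text"] else r ++ [p.2])
      else r) []  -- unreachable final else: Python appends nothing there

-- ===== PORT B =====
-- backward pass body: 'su_after.append(seen); if lab == "application": seen = False elif lab == "structure_unit": seen = True'
def pvStepFlag (st : List Bool × Bool) (lab : String) : List Bool × Bool :=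
  (st.1 ++ [st.2],
   if lab == "application" then false else if lab == "structure_unit" then true else st.2)

-- forward pass body (state: result, boundary_seen, app_seen; the booleans are updated first)
def pvStepB (st : List String × Bool × Bool) (p : String × Bool) : List String × Bool × Bool :=
  let bs := st.2.1 || pvP p.1
  let as_ := st.2.2 || pvQ p.1
  (st.1 ++
    [if p.1 == "footer" then p.1
     else if !bs then "title"
     else if p.1 == "title" then "raw_text"
     else if p.1 == "cellar" then (if !as_ && !p.2 then p.1 else "raw_text")
     else p.1],
   bs, as_)

def fix_labels_with_document_model_py_alt (labels : List String) : List String :=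
  -- for lab in reversed(labels): … ; su_after.reverse()
  let rev := labels.reverse.foldl pvStepFlag ([], false)
  let su_after := rev.1.reverse
  -- for lab, su in zip(labels, su_after): …
  ((labels.zip su_after).foldl pvStepB ([], false, false)).1

-- ===== PRECONDITION & SPEC =====
def Spec_fix_labels_with_document_model_py (labels : List String) (out : List String) : Prop := out = fix_labels_with_document_model_py_alt labels
instance (labels : List String) (out : List String) : Decidable (Spec_fix_labels_with_document_model_py labels out) := by unfold Spec_fix_labels_with_document_model_py; infer_instance

-- ===== CLAIM (what is proved, stated in full; the proofs are below) =====
def Claim_equal_fix_labels_with_document_model_py : Prop := ∀ (labels : List String), Dom_fix_labels_with_document_model_py labels → Spec_fix_labels_with_document_model_py labels (fix_labels_with_document_model_py labels)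

-- ===== LEMMAS AND PROOFS =====

-- last index of "structure_unit" strictly before the first "application", as A's first loop maintains it
def pvLbSpec : List String → Int → Option Int
  | [], _ => none
  | x :: xs, s =>
    if x = "application" then none
    else match pvLbSpec xs (s + 1) with
      | some j => some j
      | none => if x = "structure_unit" then some s else none

lemma pvMapShift (o : Option Nat) (s : Int) :
    (Option.map (fun i => i + 1) o).map (fun k : Nat => s + (k : Int)) =
      o.map (fun k : Nat => (s + 1) + (k : Int)) := by
  cases o <;> simp <;> omega

lemma pvFoldA_spec (xs : List String) : ∀ (s : Int) (t a l : Option Int),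
    (PySem.List.enumerate xs s).foldl pvStepA (t, a, l) =
      (t.or ((xs.findIdx? pvP).map (fun k : Nat => s + (k : Int))),
       a.or ((xs.findIdx? pvQ).map (fun k : Nat => s + (k : Int))),
       if a.isSome then l else (pvLbSpec xs s).or l) := by
  induction xs with
  | nil => intro s t a l; cases a <;> simp [pvLbSpec]
  | cons x xs ih =>
    intro s t a l
    rw [PySem.List.enumerate_cons, List.foldl_cons, ih]
    have hstep : pvStepA (t, a, l) (s, x) =
        (if t = none ∧ pvP x then some s else t,
         if a = none ∧ pvQ x then some s else a,
         if (if a = none ∧ pvQ x then some s else a) = none ∧ x = "structure_unit" then some s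
         else l) := rfl
    rw [hstep]
    simp only [Prod.mk.injEq]
    refine ⟨?_, ?_, ?_⟩
    · cases t with
      | some t0 => simp
      | none =>
        by_cases hx : pvP x
        · simp [hx, List.findIdx?_cons]
        · simp only [hx, List.findIdx?_cons, Bool.false_eq_true, if_false, and_false,
            Option.none_or]
          cases List.findIdx? pvP xs with
          | none => rfl
          | some k => simp; omega
    · cases a with
      | some a0 => simp
      | none =>
        by_cases hq : pvQ x
        · simp [hq, List.findIdx?_cons]
        · simp only [hq, List.findIdx?_cons, Bool.false_eq_true, if_false, and_false,
            Option.none_or]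
          cases List.findIdx? pvQ xs with
          | none => rfl
          | some k => simp; omega
    · cases a with
      | some a0 => simp
      | none =>
        by_cases hq : pvQ x
        · have hxa : x = "application" := by simpa [pvQ] using hq
          subst hxa
          simp [pvLbSpec, pvQ]
        · have hxa : x ≠ "application" := fun h => hq (by simp [pvQ, h])
          by_cases hsu : x = "structure_unit" <;>
            cases hlb : pvLbSpec xs (s + 1) <;>
            simp [pvLbSpec, hxa, hsu, hq, hlb, pvQ]

lemma pvFindIdxGetD (q : String → Bool) (xs : List String) : ∀ (s : Int),
    (((xs.findIdx? q).map (fun k : Nat => s + (k : Int))).getD (s + (xs.length : Int))) =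
      s + ((xs.findIdx q : Nat) : Int) := by
  induction xs with
  | nil => intro s; simp
  | cons x xs ih =>
    intro s
    rw [List.findIdx?_cons, List.findIdx_cons]
    by_cases hx : q x
    · simp [hx]
    · simp only [hx, Bool.false_eq_true, if_false, cond_false, pvMapShift]
      have hd : s + ((x :: xs).length : Int) = (s + 1) + (xs.length : Int) := by
        rw [List.length_cons]; push_cast; ring
      rw [hd, ih (s + 1)]
      push_cast; ring

-- bounds: a last-body index lies between the first boundary label and the first application
lemma pvLbSpec_bounds (xs : List String) : ∀ (s : Int) (j : Int), pvLbSpec xs s = some j →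
    s + ((xs.findIdx pvP : Nat) : Int) ≤ j ∧ j < s + ((xs.findIdx pvQ : Nat) : Int) := by
  induction xs with
  | nil => intro s j h; simp [pvLbSpec] at h
  | cons x xs ih =>
    intro s j h
    simp only [pvLbSpec] at h
    by_cases hne : x = "application"
    · simp [hne] at h
    · rw [if_neg hne] at h
      have hq : pvQ x = false := by simp [pvQ, hne]
      cases hlb : pvLbSpec xs (s + 1) with
      | some j2 =>
        rw [hlb] at h
        injection h with hjj
        subst hjj
        have hih := ih (s + 1) _ hlb
        have hco : (((x :: xs).findIdx pvP : Nat) : Int) ≤ ((xs.findIdx pvP : Nat) : Int) + 1 := by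
          have hco' : (x :: xs).findIdx pvP ≤ xs.findIdx pvP + 1 := by
            rw [List.findIdx_cons]; cases pvP x <;> simp
          exact_mod_cast hco'
        have hqq : (((x :: xs).findIdx pvQ : Nat) : Int) = ((xs.findIdx pvQ : Nat) : Int) + 1 := by
          have hqq' : (x :: xs).findIdx pvQ = xs.findIdx pvQ + 1 := by
            rw [List.findIdx_cons, hq, cond_false]
          exact_mod_cast hqq'
        obtain ⟨hA, hB⟩ := hih
        constructor <;> omega
      | none =>
        rw [hlb] at h
        by_cases hsu : x = "structure_unit"
        · rw [if_pos hsu] at h; cases h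
          have hp : pvP x = true := by simp [pvP, hsu]
          constructor
          · rw [List.findIdx_cons, hp, cond_true]; simp
          · rw [List.findIdx_cons, hq, cond_false]; push_cast; omega
        · rw [if_neg hsu] at h; cases h

lemma pvFindIdxMono (xs : List String) : xs.findIdx pvP ≤ xs.findIdx pvQ := by
  induction xs with
  | nil => simp
  | cons x xs ih =>
    rw [List.findIdx_cons, List.findIdx_cons]
    by_cases hq : pvQ x
    · have hp : pvP x := by
        have hxa : x = "application" := by simpa [pvQ] using hq
        simp [pvP, hxa]
      simp [hp, hq]
    · cases hp : pvP x <;> simp [hq] <;> omega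

-- the pointwise relabelling rule of A's second loop
def pvClassify (te lb ap : Int) (p : Int × String) : String :=
  if p.2 = "footer" then p.2
  else if p.1 < te then "title"
  else if p.1 < lb then (if p.2 = "cellar" ∨ p.2 = "title" then "raw_text" else p.2)
  else if p.1 < ap then (if p.2 = "title" then "raw_text" else p.2)
  else (if p.2 = "cellar" ∨ p.2 = "title" then "raw_text" else p.2)

lemma pvFoldBody (te lb ap : Int) (h1 : te ≤ lb) (h2 : lb ≤ ap) (l : List (Int × String)) :
    l.foldl (fun r p =>
      if p.2 = "footer" then r ++ [p.2]
      else if p.1 < te then r ++ ["title"]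
      else if te ≤ p.1 ∧ p.1 < lb then
        (if p.2 = "cellar" ∨ p.2 = "title" then r ++ ["raw_text"] else r ++ [p.2])
      else if lb ≤ p.1 ∧ p.1 < ap then
        (if p.2 = "title" then r ++ ["raw_text"] else r ++ [p.2])
      else if p.1 ≥ ap then
        (if p.2 = "cellar" ∨ p.2 = "title" then r ++ ["raw_text"] else r ++ [p.2])
      else r) [] = l.map (pvClassify te lb ap) := by
  have hf : (fun (r : List String) (p : Int × String) =>
      if p.2 = "footer" then r ++ [p.2]
      else if p.1 < te then r ++ ["title"]
      else if te ≤ p.1 ∧ p.1 < lb then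
        (if p.2 = "cellar" ∨ p.2 = "title" then r ++ ["raw_text"] else r ++ [p.2])
      else if lb ≤ p.1 ∧ p.1 < ap then
        (if p.2 = "title" then r ++ ["raw_text"] else r ++ [p.2])
      else if p.1 ≥ ap then
        (if p.2 = "cellar" ∨ p.2 = "title" then r ++ ["raw_text"] else r ++ [p.2])
      else r) = fun r p => r ++ [pvClassify te lb ap p] := by
    funext r p
    simp only [pvClassify]
    split_ifs <;> first | rfl | omega
  rw [hf, PySem.List.foldl_append_singleton_eq_map]
  simp

-- === B-side characterisation ===

-- the seen-flag update of B's backward pass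
def pvUpd (lab : String) (s : Bool) : Bool :=
  if lab == "application" then false else if lab == "structure_unit" then true else s

-- pvF xs = the seen-flag after B's backward pass has consumed xs
-- (= "xs contains a structure_unit before its first application")
def pvF : List String → Bool
  | [] => false
  | x :: xs => pvUpd x (pvF xs)

-- front-recursive view of the whole backward pass: (final flag, flag list in original order)
def pvG : List String → Bool × List Bool
  | [] => (false, [])
  | x :: xs => (pvUpd x (pvG xs).1, (pvG xs).1 :: (pvG xs).2)

lemma pvG_fst (xs : List String) : (pvG xs).1 = pvF xs := by
  induction xs with
  | nil => rfl
  | cons x xs ih => simp [pvG, pvF, ih]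

-- the reversed foldl of the backward pass computes pvG (flags reversed)
lemma pvFlagsFold (xs : List String) : ∀ (acc : List Bool),
    xs.reverse.foldl pvStepFlag (acc, false) = (acc ++ (pvG xs).2.reverse, (pvG xs).1) := by
  induction xs with
  | nil => intro acc; simp [pvG]
  | cons x xs ih =>
    intro acc
    rw [List.reverse_cons, List.foldl_append, ih]
    simp [pvStepFlag, pvG, pvUpd]

-- the recursion B's forward loop performs, with the suffix flag made explicit
def pvRec : List String → Bool → Bool → List String
  | [], _, _ => []
  | x :: xs, bs0, as0 =>
    (if x == "footer" then x
     else if !(bs0 || pvP x) then "title"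
     else if x == "title" then "raw_text"
     else if x == "cellar" then (if !(as0 || pvQ x) && !(pvF xs) then x else "raw_text")
     else x) :: pvRec xs (bs0 || pvP x) (as0 || pvQ x)

lemma pvZipFold (xs : List String) : ∀ (res : List String) (bs as_ : Bool),
    ((xs.zip (pvG xs).2).foldl pvStepB (res, bs, as_)).1 = res ++ pvRec xs bs as_ := by
  induction xs with
  | nil => intro res bs as_; simp [pvRec]
  | cons x xs ih =>
    intro res bs as_
    rw [show pvG (x :: xs) = ((pvG (x :: xs)).1, (pvG xs).1 :: (pvG xs).2) from rfl]
    rw [List.zip_cons_cons, List.foldl_cons, pvG_fst]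
    rw [show pvStepB (res, bs, as_) (x, pvF xs) =
        (res ++
          [if x == "footer" then x
           else if !(bs || pvP x) then "title"
           else if x == "title" then "raw_text"
           else if x == "cellar" then (if !(as_ || pvQ x) && !(pvF xs) then x else "raw_text")
           else x],
         bs || pvP x, as_ || pvQ x) from rfl]
    rw [ih, pvRec]
    simp

-- === linking pvF with pvLbSpec ===

lemma pvLbSpec_shift (xs : List String) : ∀ (s : Int),
    pvLbSpec xs s = (pvLbSpec xs 0).map (fun j => j + s) := by
  induction xs with
  | nil => intro s; simp [pvLbSpec]
  | cons x xs ih =>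
    intro s
    by_cases hne : x = "application"
    · simp [pvLbSpec, hne]
    · rw [show pvLbSpec (x :: xs) s =
          (if x = "application" then none
           else match pvLbSpec xs (s + 1) with
             | some j => some j
             | none => if x = "structure_unit" then some s else none) from rfl]
      rw [show pvLbSpec (x :: xs) 0 =
          (if x = "application" then none
           else match pvLbSpec xs (0 + 1) with
             | some j => some j
             | none => if x = "structure_unit" then some 0 else none) from rfl]
      rw [if_neg hne, if_neg hne, ih (s + 1), ih (0 + 1)]
      cases pvLbSpec xs 0 with
      | none => by_cases hsu : x = "structure_unit" <;> simp [hsu]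
      | some j0 => simp; omega

lemma pvLbSpec_isSome (xs : List String) : ∀ (s : Int), (pvLbSpec xs s).isSome = pvF xs := by
  induction xs with
  | nil => intro s; simp [pvLbSpec, pvF]
  | cons x xs ih =>
    intro s
    by_cases hne : x = "application"
    · simp [pvLbSpec, hne, pvF, pvUpd]
    · rw [show pvLbSpec (x :: xs) s =
          (if x = "application" then none
           else match pvLbSpec xs (s + 1) with
             | some j => some j
             | none => if x = "structure_unit" then some s else none) from rfl]
      rw [if_neg hne]
      have hih := ih (s + 1)
      cases hlb : pvLbSpec xs (s + 1) with
      | some j =>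
        rw [hlb] at hih
        simp [pvF, pvUpd, hne, ← hih]
      | none =>
        rw [hlb] at hih
        by_cases hsu : x = "structure_unit" <;> simp [pvF, pvUpd, hne, hsu, ← hih]

lemma pvF_drop (labels : List String) : ∀ (i : Nat), i < labels.findIdx pvQ →
    (pvF (labels.drop (i + 1)) = true ↔
      ∃ j : Int, pvLbSpec labels 0 = some j ∧ (i : Int) < j) := by
  induction labels with
  | nil => intro i h; simp at h
  | cons x xs ih =>
    intro i h
    rw [List.findIdx_cons] at h
    by_cases hq : pvQ x
    · rw [hq, cond_true] at h; omega
    · rw [show (pvQ x : Bool) = false from by simpa using hq, cond_false] at h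
      have hne : x ≠ "application" := fun e => hq (by simp [pvQ, e])
      rw [show pvLbSpec (x :: xs) 0 =
          (if x = "application" then none
           else match pvLbSpec xs (0 + 1) with
             | some j => some j
             | none => if x = "structure_unit" then some 0 else none) from rfl]
      rw [if_neg hne]
      cases i with
      | zero =>
        rw [show (x :: xs).drop 1 = xs from rfl]
        have hsome := pvLbSpec_isSome xs (0 + 1)
        cases hlb : pvLbSpec xs (0 + 1) with
        | some j =>
          rw [hlb] at hsome
          have hb := pvLbSpec_bounds xs (0 + 1) j hlb
          constructor
          · intro _; exact ⟨j, rfl, by omega⟩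
          · intro _; rw [← hsome]; rfl
        | none =>
          rw [hlb] at hsome
          constructor
          · intro hc; rw [← hsome] at hc; simp at hc
          · rintro ⟨j, hj, hlt⟩
            by_cases hsu : x = "structure_unit" <;> simp [hsu] at hj <;> omega
      | succ i' =>
        have h' : i' < xs.findIdx pvQ := by omega
        rw [show (x :: xs).drop (i' + 1 + 1) = xs.drop (i' + 1) from rfl]
        rw [ih i' h']
        have hsh := pvLbSpec_shift xs (0 + 1)
        cases hlb0 : pvLbSpec xs 0 with
        | some j0 =>
          rw [hlb0, Option.map_some] at hsh
          rw [hsh]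
          constructor
          · rintro ⟨j, hj, hlt⟩
            injection hj with e
            exact ⟨j0 + (0 + 1), rfl, by push_cast; omega⟩
          · rintro ⟨j, hj, hlt⟩
            have e : (some (j0 + (0 + 1)) : Option Int) = some j := hj
            injection e with e
            exact ⟨j0, rfl, by push_cast at hlt ⊢; omega⟩
        | none =>
          rw [hlb0, Option.map_none] at hsh
          rw [hsh]
          constructor
          · rintro ⟨j, hj, _⟩; cases hj
          · rintro ⟨j, hj, hlt⟩
            by_cases hsu : x = "structure_unit"
            · have hj' : (some (0 : Int) : Option Int) = some j := by
                have h0 : (if x = "structure_unit" then (some (0 : Int)) else none) = some j := hj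
                rwa [if_pos hsu] at h0
              injection hj' with e
              exfalso; push_cast at hlt; omega
            · have hj' : (none : Option Int) = some j := by
                have h0 : (if x = "structure_unit" then (some (0 : Int)) else none) = some j := hj
                rwa [if_neg hsu] at h0
              cases hj'

-- === A's pointwise rule equals B's forward recursion ===

lemma pvFindIdxSucc (p : String → Bool) : ∀ (l : List String) (i : Nat) (x : String),
    l[i]? = some x → (l.findIdx p < i + 1 ↔ (l.findIdx p < i ∨ p x = true)) := by
  intro l
  induction l with
  | nil => intro i x h; simp at h
  | cons y l' ih =>
    intro i x h
    cases i with
    | zero =>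
      have hx : y = x := by simpa using h
      rw [List.findIdx_cons, hx]
      cases hp : p x <;> simp [hp] <;> omega
    | succ i =>
      have h' : l'[i]? = some x := by simpa using h
      have hih := ih i x h'
      rw [List.findIdx_cons]
      cases hp : p y
      · simp only [cond_false]
        cases hpx : p x <;> simp [hpx] at hih ⊢ <;> omega
      · simp only [cond_true]
        cases hpx : p x <;> simp [hpx] at hih ⊢ <;> omega

-- head case of the main induction
lemma pvHead (teN apN : Nat) (lb : Int) (i : Nat) (x : String) (fx : Bool)
    (hbs : (decide (teN < i) || pvP x) = decide (teN ≤ i))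
    (has : (decide (apN < i) || pvQ x) = decide (apN ≤ i))
    (hfx : (teN : Int) ≤ (i : Int) → i < apN → (fx = true ↔ (i : Int) < lb))
    (Hb1 : ((teN : Nat) : Int) ≤ lb) (Hb2 : lb ≤ ((apN : Nat) : Int)) :
    pvClassify (teN : Int) lb (apN : Int) ((i : Int), x) =
      (if x == "footer" then x
       else if !(decide (teN < i) || pvP x) then "title"
       else if x == "title" then "raw_text"
       else if x == "cellar" then (if !(decide (apN < i) || pvQ x) && !fx then x else "raw_text")
       else x) := by
  rw [hbs, has]
  by_cases hf : x = "footer"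
  · simp [pvClassify, hf]
  by_cases hti : teN ≤ i
  · have e1 : ¬((i : Int) < (teN : Int)) := by exact_mod_cast not_lt.mpr hti
    have ebs : decide (teN ≤ i) = true := decide_eq_true hti
    by_cases hai : apN ≤ i
    · have e2 : ¬((i : Int) < (apN : Int)) := by exact_mod_cast not_lt.mpr hai
      have e3 : ¬((i : Int) < lb) := by omega
      have eas : decide (apN ≤ i) = true := decide_eq_true hai
      by_cases hx1 : x = "title"
      · simp [pvClassify, hf, hx1, e1, e3, e2, ebs, eas]
      by_cases hx2 : x = "cellar"
      · simp [pvClassify, hf, hx1, hx2, e1, e3, e2, ebs, eas]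
      · simp [pvClassify, hf, hx1, hx2, e1, e3, e2, ebs, eas]
    · have e2 : ((i : Int) < (apN : Int)) := by exact_mod_cast not_le.mp hai
      have eas : decide (apN ≤ i) = false := decide_eq_false hai
      have hiff := hfx (by exact_mod_cast hti) (by omega)
      by_cases hx1 : x = "title"
      · by_cases hl : (i : Int) < lb <;> simp [pvClassify, hf, hx1, e1, hl, e2, ebs, eas]
      by_cases hx2 : x = "cellar"
      · by_cases hl : (i : Int) < lb
        · have hfxv : fx = true := hiff.mpr hl
          simp [pvClassify, hf, hx1, hx2, e1, hl, ebs, eas, hfxv]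
        · have hfxv : fx = false := by
            cases hfv : fx
            · rfl
            · exact absurd (hiff.mp hfv) hl
          simp [pvClassify, hf, hx1, hx2, e1, hl, e2, ebs, eas, hfxv]
      · by_cases hl : (i : Int) < lb <;> simp [pvClassify, hf, hx1, hx2, e1, hl, e2, ebs, eas]
  · have e1 : ((i : Int) < (teN : Int)) := by exact_mod_cast not_le.mp hti
    have ebs : decide (teN ≤ i) = false := decide_eq_false hti
    simp [pvClassify, hf, e1, ebs]

lemma pvRecA (labels : List String) (lb : Int)
    (Hlb : ∀ (i : Nat), ((labels.findIdx pvP : Nat) : Int) ≤ (i : Int) → i < labels.findIdx pvQ →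
        (pvF (labels.drop (i + 1)) = true ↔ (i : Int) < lb))
    (Hb1 : ((labels.findIdx pvP : Nat) : Int) ≤ lb)
    (Hb2 : lb ≤ ((labels.findIdx pvQ : Nat) : Int)) :
    ∀ (xs : List String) (i : Nat), labels.drop i = xs →
    (PySem.List.enumerate xs (i : Int)).map
        (pvClassify ((labels.findIdx pvP : Nat) : Int) lb ((labels.findIdx pvQ : Nat) : Int)) =
      pvRec xs (decide (labels.findIdx pvP < i)) (decide (labels.findIdx pvQ < i)) := by
  intro xs
  induction xs with
  | nil => intro i _; simp [pvRec]
  | cons x xs ih =>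
    intro i hdrop
    have hget : labels[i]? = some x := by
      have h0 : (labels.drop i)[0]? = some x := by rw [hdrop]; rfl
      rw [List.getElem?_drop] at h0
      simpa using h0
    have hdrop' : labels.drop (i + 1) = xs := by
      rw [← List.tail_drop, hdrop]
      rfl
    have hP := pvFindIdxSucc pvP labels i x hget
    have hQ := pvFindIdxSucc pvQ labels i x hget
    have hbs : (decide (labels.findIdx pvP < i) || pvP x) = decide (labels.findIdx pvP ≤ i) := by
      cases hpx : pvP x
      · rw [hpx] at hP; simp at hP
        simp only [Bool.or_false, decide_eq_decide]
        omega
      · rw [hpx] at hP; simp at hP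
        simp only [Bool.or_true]
        have : labels.findIdx pvP ≤ i := by omega
        simp [this]
    have has : (decide (labels.findIdx pvQ < i) || pvQ x) = decide (labels.findIdx pvQ ≤ i) := by
      cases hpx : pvQ x
      · rw [hpx] at hQ; simp at hQ
        simp only [Bool.or_false, decide_eq_decide]
        omega
      · rw [hpx] at hQ; simp at hQ
        have : labels.findIdx pvQ ≤ i := by omega
        simp [this]
    rw [PySem.List.enumerate_cons, List.map_cons]
    rw [show pvRec (x :: xs) (decide (labels.findIdx pvP < i)) (decide (labels.findIdx pvQ < i)) =
        (if x == "footer" then x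
         else if !(decide (labels.findIdx pvP < i) || pvP x) then "title"
         else if x == "title" then "raw_text"
         else if x == "cellar" then
           (if !(decide (labels.findIdx pvQ < i) || pvQ x) && !(pvF xs) then x else "raw_text")
         else x) :: pvRec xs (decide (labels.findIdx pvP < i) || pvP x)
              (decide (labels.findIdx pvQ < i) || pvQ x) from rfl]
    congr 1
    · have hfx : ((labels.findIdx pvP : Nat) : Int) ≤ (i : Int) → i < labels.findIdx pvQ →
          ((pvF xs) = true ↔ (i : Int) < lb) := by
        intro hte hap
        rw [← hdrop']
        exact Hlb i hte hap
      exact pvHead (labels.findIdx pvP) (labels.findIdx pvQ) lb i x (pvF xs) hbs has hfx Hb1 Hb2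
    · rw [show ((i : Int) + 1) = (((i + 1 : Nat) : Nat) : Int) from by push_cast; ring]
      rw [ih (i + 1) hdrop', hbs, has]
      congr 1
      · simp only [decide_eq_decide]; omega
      · simp only [decide_eq_decide]; omega

-- ===== VERDICT (by name: the statement is the Claim_ definition above) =====
theorem fix_labels_with_document_model_py_spec : Claim_equal_fix_labels_with_document_model_py := by
  intro labels _
  unfold Spec_fix_labels_with_document_model_py
  unfold fix_labels_with_document_model_py fix_labels_with_document_model_py_alt
  simp only []
  rw [pvFoldA_spec labels 0 none none none]
  simp only [Option.none_or, Option.or_none, Option.isSome_none, Bool.false_eq_true, if_false]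
  have hte : ((labels.findIdx? pvP).map (fun k : Nat => (0 : Int) + (k : Int))).getD
      ((labels.length : Int)) = ((labels.findIdx pvP : Nat) : Int) := by
    have h := pvFindIdxGetD pvP labels 0
    rw [show (0 : Int) + (labels.length : Int) = (labels.length : Int) from by ring] at h
    rw [h]; ring
  have hap : ((labels.findIdx? pvQ).map (fun k : Nat => (0 : Int) + (k : Int))).getD
      ((labels.length : Int)) = ((labels.findIdx pvQ : Nat) : Int) := by
    have h := pvFindIdxGetD pvQ labels 0
    rw [show (0 : Int) + (labels.length : Int) = (labels.length : Int) from by ring] at h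
    rw [h]; ring
  simp only [hte, hap]
  -- B side: flags list and zip fold
  rw [pvFlagsFold labels [], List.nil_append, List.reverse_reverse, pvZipFold labels [] false false,
    List.nil_append]
  -- A side: fold = map pvClassify = pvRec
  have hmono := pvFindIdxMono labels
  cases hlb : pvLbSpec labels 0 with
  | none =>
    simp only [Option.getD_none]
    have Hlb : ∀ (i : Nat), ((labels.findIdx pvP : Nat) : Int) ≤ (i : Int) →
        i < labels.findIdx pvQ →
        (pvF (labels.drop (i + 1)) = true ↔ (i : Int) < ((labels.findIdx pvP : Nat) : Int)) := by
      intro i hte' hap'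
      rw [pvF_drop labels i hap', hlb]
      constructor
      · rintro ⟨j, hj, _⟩; cases hj
      · intro h; omega
    refine (pvFoldBody ((labels.findIdx pvP : Nat) : Int) ((labels.findIdx pvP : Nat) : Int)
        ((labels.findIdx pvQ : Nat) : Int) (le_refl _) (by exact_mod_cast hmono)
        (PySem.List.enumerate labels)).trans ?_
    have hmain := pvRecA labels ((labels.findIdx pvP : Nat) : Int) Hlb (le_refl _)
        (by exact_mod_cast hmono) labels 0 rfl
    have d1 : (decide (labels.findIdx pvP < 0)) = false := by simp
    have d2 : (decide (labels.findIdx pvQ < 0)) = false := by simp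
    rw [d1, d2] at hmain
    exact hmain
  | some j =>
    obtain ⟨hb1, hb2⟩ := pvLbSpec_bounds labels 0 j hlb
    simp only [Option.getD_some]
    have Hlb : ∀ (i : Nat), ((labels.findIdx pvP : Nat) : Int) ≤ (i : Int) →
        i < labels.findIdx pvQ →
        (pvF (labels.drop (i + 1)) = true ↔ (i : Int) < j) := by
      intro i _ hap'
      rw [pvF_drop labels i hap', hlb]
      constructor
      · rintro ⟨j', hj, hlt⟩; injection hj with e; omega
      · intro h; exact ⟨j, rfl, h⟩
    refine (pvFoldBody ((labels.findIdx pvP : Nat) : Int) j ((labels.findIdx pvQ : Nat) : Int)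
        (by omega) (by omega) (PySem.List.enumerate labels)).trans ?_
    have hmain := pvRecA labels j Hlb (by omega) (by omega) labels 0 rfl
    have d1 : (decide (labels.findIdx pvP < 0)) = false := by simp
    have d2 : (decide (labels.findIdx pvQ < 0)) = false := by simp
    rw [d1, d2] at hmain
    exact hmain
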